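-- pv_equiv track=rewrite | github.com/Snaiel/ML-Fireballs | point_pickings/core/sequence.py | get_left_to_right_sequence_from_distance_labels
-- ===== SOURCE A (Python) =====
-- def get_left_to_right_sequence_from_distance_labels(distance_labels: list[int]) -> str:
--     """
--         Creates a left-to-right sequence from the provided distance labels.
--         Applies the DFN encoding system where two 1s equal a singular 1. One zero is a singular zero.
--
--         ### Parameters
--         | Name             | Type       | Description                                  |
--         |------------------|------------|----------------------------------------------|
--         | distance_labels  | list[int]  | The 1 or 0 label for the distances.          |
--
--         ### Returns
--         | Type             | Description                                                             |
--         |------------------|-------------------------------------------------------------------------|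
--         | str              | The left-to-right sequence of 1s or 0s made from the distance labels.   |
--     """
--     lr_sequence = ""
--     skip_value = False
--
--     for i in distance_labels:
--         if i == 0:
--             lr_sequence += str(i)
--             skip_value = False
--         elif i == 1:
--             if skip_value:
--                 skip_value = False
--             else:
--                 lr_sequence += str(i)
--                 skip_value = True
--
--     return lr_sequence
-- ===== SOURCE B (Python) =====
-- def get_left_to_right_sequence_from_distance_labels(distance_labels: list[int]) -> str:
--     # Run-length view: non-0/1 labels are transparent, so drop them; each maximal
--     # run of zeros contributes one '0' per zero, each maximal run of k ones
--     # contributes ceil(k/2) ones (A's toggle keeps the odd-indexed 1s of a run).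
--     filtered = [i for i in distance_labels if i in (0, 1)]
--     pieces = []
--     idx = 0
--     n = len(filtered)
--     while idx < n:
--         v = filtered[idx]
--         j = idx
--         while j < n and filtered[j] == v:
--             j += 1
--         run = j - idx
--         pieces.append('0' * run if v == 0 else '1' * ((run + 1) // 2))
--         idx = j
--     return ''.join(pieces)
-- ===== Notes on version B (the rewrite author's own statement) =====
-- stated objective: alternative
-- what changed: Replaces A's character-by-character toggle automaton with a filter + run-length decomposition: maximal runs of equal labels are found and each run is emitted by a closed formula (one '0' per zero, ceil(k/2) ones per run of k ones).
import Mathlib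
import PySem

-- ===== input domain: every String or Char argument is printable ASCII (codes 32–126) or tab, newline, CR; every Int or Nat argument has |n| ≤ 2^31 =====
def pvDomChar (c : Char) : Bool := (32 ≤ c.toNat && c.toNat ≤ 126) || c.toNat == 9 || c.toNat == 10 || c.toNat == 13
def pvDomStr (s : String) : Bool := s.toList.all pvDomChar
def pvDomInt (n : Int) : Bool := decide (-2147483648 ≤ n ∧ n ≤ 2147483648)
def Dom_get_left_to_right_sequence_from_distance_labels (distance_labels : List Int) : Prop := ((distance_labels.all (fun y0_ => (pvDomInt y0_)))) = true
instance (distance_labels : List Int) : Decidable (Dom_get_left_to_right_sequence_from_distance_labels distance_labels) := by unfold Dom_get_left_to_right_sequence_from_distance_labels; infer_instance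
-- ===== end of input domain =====

-- B replaces A's toggle automaton by filter + run-length decomposition with a closed formula per run (objective: alternative; same cost).


-- ===== PORT A =====
-- one loop step: state = (lr_sequence, skip_value)
def pvStepA (st : String × Bool) (i : Int) : String × Bool :=
  if i = 0 then (st.1 ++ PySem.Int.toStr i, false)
  else if i = 1 then
    (if st.2 then (st.1, false) else (st.1 ++ PySem.Int.toStr i, true))
  else st

def get_left_to_right_sequence_from_distance_labels (distance_labels : List Int) : String :=
  (distance_labels.foldl pvStepA ("", false)).1

-- ===== PORT B =====
-- '0' * run  /  '1' * ((run+1)//2)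
def pvRep (c : Char) (n : Nat) : String := String.ofList (List.replicate n c)

-- the while loop over runs: scan one maximal run, emit its piece, continue after it
def pvRuns : List Int → List String
  | [] => []
  | v :: rest =>
    let run := (rest.takeWhile (fun j => j == v)).length + 1
    (if v = 0 then pvRep '0' run else pvRep '1' ((run + 1) / 2))
      :: pvRuns (rest.dropWhile (fun j => j == v))
termination_by l => l.length
decreasing_by
  simpa using Nat.lt_succ_of_le (List.length_dropWhile_le _ _)

def get_left_to_right_sequence_from_distance_labels_alt (distance_labels : List Int) : String :=
  String.join (pvRuns (distance_labels.filter (fun i => i == 0 || i == 1)))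

-- ===== PRECONDITION & SPEC =====
def Spec_get_left_to_right_sequence_from_distance_labels (distance_labels : List Int) (out : String) : Prop := out = get_left_to_right_sequence_from_distance_labels_alt distance_labels
instance (distance_labels : List Int) (out : String) : Decidable (Spec_get_left_to_right_sequence_from_distance_labels distance_labels out) := by unfold Spec_get_left_to_right_sequence_from_distance_labels; infer_instance

-- ===== CLAIM (what is proved, stated in full; the proofs are below) =====
def Claim_equal_get_left_to_right_sequence_from_distance_labels : Prop := ∀ (distance_labels : List Int), Dom_get_left_to_right_sequence_from_distance_labels distance_labels → Spec_get_left_to_right_sequence_from_distance_labels distance_labels (get_left_to_right_sequence_from_distance_labels distance_labels)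

-- ===== LEMMAS AND PROOFS =====

theorem pvStepA_zero (a : String) (b : Bool) :
    pvStepA (a, b) 0 = (a ++ PySem.Int.toStr 0, false) := by simp [pvStepA]

theorem pvStepA_one_false (a : String) :
    pvStepA (a, false) 1 = (a ++ PySem.Int.toStr 1, true) := by simp [pvStepA]

theorem pvStepA_one_true (a : String) :
    pvStepA (a, true) 1 = (a, false) := by simp [pvStepA]

theorem pvStepA_other (s : String × Bool) (i : Int) (h0 : i ≠ 0) (h1 : i ≠ 1) :
    pvStepA s i = s := by simp [pvStepA, h0, h1]

-- A's loop ignores labels other than 0 and 1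
theorem pvFoldA_filter (xs : List Int) (s : String × Bool) :
    xs.foldl pvStepA s = (xs.filter (fun i => i == 0 || i == 1)).foldl pvStepA s := by
  induction xs generalizing s with
  | nil => rfl
  | cons x xs ih =>
    by_cases h0 : x = 0
    · subst h0; simp only [List.filter_cons, List.foldl_cons]
      rw [if_pos (by decide)]
      simp only [List.foldl_cons]
      exact ih _
    · by_cases h1 : x = 1
      · subst h1; simp only [List.filter_cons, List.foldl_cons]
        rw [if_pos (by decide)]
        simp only [List.foldl_cons]
        exact ih _
      · simp only [List.filter_cons, List.foldl_cons]
        rw [if_neg (by simp [h0, h1]), pvStepA_other s x h0 h1]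
        exact ih s

-- accumulator factoring
theorem pvFoldA_acc (xs : List Int) (a : String) (b : Bool) :
    xs.foldl pvStepA (a, b) =
      (a ++ (xs.foldl pvStepA ("", b)).1, (xs.foldl pvStepA ("", b)).2) := by
  induction xs generalizing a b with
  | nil => simp
  | cons x xs ih =>
    simp only [List.foldl_cons]
    by_cases h0 : x = 0
    · subst h0
      rw [pvStepA_zero, pvStepA_zero, ih (a ++ PySem.Int.toStr 0) false,
        ih ("" ++ PySem.Int.toStr 0) false]
      simp [String.append_assoc]
    · by_cases h1 : x = 1
      · subst h1
        cases b with
        | false =>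
          rw [pvStepA_one_false, pvStepA_one_false, ih (a ++ PySem.Int.toStr 1) true,
            ih ("" ++ PySem.Int.toStr 1) true]
          simp [String.append_assoc]
        | true =>
          rw [pvStepA_one_true, pvStepA_one_true, ih a false, ih "" false]
      · rw [pvStepA_other _ x h0 h1, pvStepA_other _ x h0 h1]
        exact ih a b

theorem pvRep_succ (c : Char) (n : Nat) :
    pvRep c (n + 1) = String.ofList [c] ++ pvRep c n := by
  apply String.ext
  simp [pvRep, List.replicate_succ]

theorem pvToStr_zero : PySem.Int.toStr 0 = String.ofList ['0'] := by decide
theorem pvToStr_one : PySem.Int.toStr 1 = String.ofList ['1'] := by decide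

-- a run of zeros from skip=false
theorem pvRunZero (k : Nat) :
    (List.replicate k (0 : Int)).foldl pvStepA ("", false) = (pvRep '0' k, false) := by
  induction k with
  | zero => simp [pvRep]
  | succ n ih =>
    rw [List.replicate_succ, List.foldl_cons, pvStepA_zero, pvFoldA_acc, ih, pvRep_succ]
    simp [pvToStr_zero]

-- a run of ones from skip=false: emits ceil(k/2) ones, final skip = (k odd)
theorem pvRunOne (k : Nat) :
    (List.replicate k (1 : Int)).foldl pvStepA ("", false) =
      (pvRep '1' ((k + 1) / 2), decide (k % 2 = 1)) := by
  induction k using Nat.strong_induction_on with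
  | _ k ih =>
    match k with
    | 0 => simp [pvRep]
    | 1 =>
      simp only [List.replicate, List.foldl_cons, List.foldl_nil, pvStepA_one_false]
      simp [pvToStr_one, pvRep]
    | (n + 2) =>
      rw [List.replicate_succ, List.replicate_succ, List.foldl_cons, List.foldl_cons,
        pvStepA_one_false]
      rw [show ("" ++ PySem.Int.toStr 1, true) = (PySem.Int.toStr 1, true) by simp]
      rw [pvStepA_one_true, pvFoldA_acc, ih n (by omega)]
      have h2 : (n + 2 + 1) / 2 = (n + 1) / 2 + 1 := by omega
      have h3 : (n + 2) % 2 = n % 2 := by omega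
      rw [h2, h3, pvRep_succ]
      simp [pvToStr_one]

-- after a maximal run, a leading 0 (or the end of input) makes the skip flag irrelevant
theorem pvFoldA_reset (zs : List Int) (a : String) (b : Bool)
    (hz : ∀ z ∈ zs, z = 0 ∨ z = 1) (hh : zs.head? ≠ some 1) :
    (zs.foldl pvStepA (a, b)).1 = (zs.foldl pvStepA (a, false)).1 := by
  cases zs with
  | nil => rfl
  | cons z zs =>
    have hz0 : z = 0 := by
      rcases hz z (by simp) with h | h
      · exact h
      · exact absurd (by simp [h]) hh
    subst hz0
    simp only [List.foldl_cons, pvStepA_zero]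

theorem pvFoldAppend (l : List String) (a : String) :
    l.foldl (· ++ ·) a = a ++ l.foldl (· ++ ·) "" := by
  induction l generalizing a with
  | nil => simp
  | cons s l ih =>
    simp only [List.foldl_cons]
    rw [ih (a ++ s), ih ("" ++ s)]
    simp [String.append_assoc]

theorem pvJoin_cons (s : String) (l : List String) :
    String.join (s :: l) = s ++ String.join l := by
  simp only [String.join, List.foldl_cons]
  exact (pvFoldAppend l ("" ++ s)).trans (by simp)

theorem pvHead_dropWhile (p : Int → Bool) (l : List Int) (x : Int)
    (h : (l.dropWhile p).head? = some x) : p x = false := by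
  induction l with
  | nil => simp at h
  | cons y ys ih =>
    rw [List.dropWhile_cons] at h
    split at h
    · exact ih h
    · simp_all

-- main: on a 0/1-only list, A's fold computes B's run decomposition
theorem pvMain (n : Nat) (ys : List Int) (hn : ys.length ≤ n)
    (hy : ∀ y ∈ ys, y = 0 ∨ y = 1) :
    (ys.foldl pvStepA ("", false)).1 = String.join (pvRuns ys) := by
  induction n generalizing ys with
  | zero =>
    have : ys = [] := List.eq_nil_of_length_eq_zero (Nat.le_zero.mp hn)
    subst this
    simp [pvRuns, String.join]
  | succ n ih =>
    cases ys with
    | nil => simp [pvRuns, String.join]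
    | cons v rest =>
      have hrest : rest.takeWhile (fun j => j == v) ++ rest.dropWhile (fun j => j == v) = rest :=
        List.takeWhile_append_dropWhile
      have htv : ∀ b ∈ rest.takeWhile (fun j => j == v), b = v := fun b hb => by
        simpa using List.mem_takeWhile_imp hb
      have htrep : rest.takeWhile (fun j => j == v) =
          List.replicate (rest.takeWhile (fun j => j == v)).length v :=
        List.eq_replicate_of_mem htv
      have hdn : (rest.dropWhile (fun j => j == v)).length ≤ n := by
        have h1 := List.length_dropWhile_le (fun j => j == v) rest
        have h2 : rest.length ≤ n := by simpa using Nat.le_of_succ_le_succ hn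
        omega
      have hdmem : ∀ y ∈ rest.dropWhile (fun j => j == v), y = 0 ∨ y = 1 := fun y hy2 => by
        apply hy
        exact List.mem_cons_of_mem v (hrest ▸ List.mem_append_right _ hy2)
      have hruns : pvRuns (v :: rest) =
          (if v = 0 then pvRep '0' ((rest.takeWhile (fun j => j == v)).length + 1)
           else pvRep '1' (((rest.takeWhile (fun j => j == v)).length + 1 + 1) / 2))
            :: pvRuns (rest.dropWhile (fun j => j == v)) := by
        rw [pvRuns]
      have hvrest : v :: rest =
          List.replicate ((rest.takeWhile (fun j => j == v)).length + 1) v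
            ++ rest.dropWhile (fun j => j == v) := by
        rw [List.replicate_succ, ← htrep]
        simp [hrest]
      rw [hruns, pvJoin_cons, hvrest, List.foldl_append]
      rcases hy v (by simp) with hv | hv
      · subst hv
        rw [if_pos rfl, pvRunZero, pvFoldA_acc, ih _ hdn hdmem]
      · subst hv
        have hdh : (rest.dropWhile (fun j => j == (1:Int))).head? ≠ some 1 := by
          intro hcon
          have := pvHead_dropWhile (fun j => j == (1:Int)) rest 1 hcon
          simp at this
        rw [if_neg (by decide), pvRunOne,
          pvFoldA_reset _ _ _ hdmem hdh, pvFoldA_acc, ih _ hdn hdmem]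

-- ===== VERDICT (by name: the statement is the Claim_ definition above) =====
theorem get_left_to_right_sequence_from_distance_labels_spec : Claim_equal_get_left_to_right_sequence_from_distance_labels := by
  intro xs _
  show _ = _
  unfold get_left_to_right_sequence_from_distance_labels get_left_to_right_sequence_from_distance_labels_alt
  rw [pvFoldA_filter]
  exact pvMain (xs.filter (fun i => i == 0 || i == 1)).length _ le_rfl
    (fun y hy => by rcases List.mem_filter.mp hy with ⟨_, h⟩; simpa using h)
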